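-- pv_equiv track=rewrite | github.com/Anmol-Singh-Jaggi/interview-notes | notes/algo-ds-practice/problems/greedy/coin_piles.py | min_coin_remove_all
-- ===== SOURCE A (Python) =====
-- def min_coin_remove(piles, start, k):
--     ans = 0
--     max_limit = piles[start] + k
--     for i in range(len(piles) - 1, start - 1, -1):
--         if piles[i] > max_limit:
--             diff = piles[i] - max_limit
--             ans += diff
--     return ans
--
-- def min_coin_remove_all(piles, k):
--     if len(piles) == 1:
--         return 0
--     ans = 100000000
--     piles.sort()
--     cum_sum = []
--     sum = 0
--     for i in range(0, len(piles)):
--         sum += piles[i]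
--         cum_sum.append(sum)
--     for start in range(0, len(piles) - 1):
--         ans2 = min_coin_remove(piles, start, k)
--         if start >= 1:
--             ans2 += cum_sum[start - 1]
--         ans = min(ans, ans2)
--     return ans
-- ===== SOURCE B (Python) =====
-- # Sorted piles + prefix sums + per-start binary search: O(n log n) instead of A's O(n^2).
-- # Like A, sorts `piles` in place (same observable mutation).
-- def min_coin_remove_all(piles, k):
--     if len(piles) == 1:
--         return 0
--     piles.sort()
--     n = len(piles)
--     prefix = [0]
--     run = 0
--     for p in piles:
--         run += p
--         prefix.append(run)
--     total = prefix[n]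
--     best = 100000000
--     for s in range(n - 1):
--         limit = piles[s] + k
--         lo, hi = s, n
--         while lo < hi:
--             mid = (lo + hi) // 2
--             if piles[mid] > limit:
--                 hi = mid
--             else:
--                 lo = mid + 1
--         best = min(best, prefix[s] + (total - prefix[lo]) - limit * (n - lo))
--     return best
-- ===== Notes on version B (the rewrite author's own statement) =====
-- stated objective: faster
-- what changed: Replaces A's per-start rescan of the tail (helper min_coin_remove, O(n) each) by prefix sums plus a binary search for the first pile exceeding limit, so each start costs O(log n).
import Mathlib
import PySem

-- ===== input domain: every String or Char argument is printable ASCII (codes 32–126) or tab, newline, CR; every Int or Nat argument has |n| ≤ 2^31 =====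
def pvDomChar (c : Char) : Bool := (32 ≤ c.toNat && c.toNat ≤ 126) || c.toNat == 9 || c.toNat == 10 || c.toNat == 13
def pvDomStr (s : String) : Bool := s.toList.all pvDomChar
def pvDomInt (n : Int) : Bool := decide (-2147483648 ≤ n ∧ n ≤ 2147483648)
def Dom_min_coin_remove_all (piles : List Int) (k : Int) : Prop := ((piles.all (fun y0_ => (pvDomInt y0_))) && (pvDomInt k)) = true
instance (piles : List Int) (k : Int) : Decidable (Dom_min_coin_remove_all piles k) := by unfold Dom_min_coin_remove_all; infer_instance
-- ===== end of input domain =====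

-- B replaces A's O(n) rescan per start by prefix sums and a binary search (O(n log n) total).
-- Both Pythons sort `piles` in place; the equivalence proved here is about the return value.

-- ===== PORT A =====
-- helper min_coin_remove: piles[start] is always in range at every call site, so pyGetD is exact.
def min_coin_remove (piles : List Int) (start : Int) (k : Int) : Int :=
  let max_limit := PySem.List.pyGetD piles start 0 + k
  (PySem.List.pyRange ((piles.length : Int) - 1) (start - 1) (-1)).foldl
    (fun ans i =>
      if PySem.List.pyGetD piles i 0 > max_limit then
        ans + (PySem.List.pyGetD piles i 0 - max_limit)
      else ans) 0

def min_coin_remove_all (piles : List Int) (k : Int) : Int :=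
  if piles.length == 1 then 0
  else
    let p := PySem.List.sorted piles (fun x => x) false
    let cum := ((PySem.List.pyRange 0 (p.length : Int) 1).foldl
      (fun (st : List Int × Int) i =>
        let s := st.2 + PySem.List.pyGetD p i 0
        (st.1 ++ [s], s)) ([], 0)).1
    (PySem.List.pyRange 0 ((p.length : Int) - 1) 1).foldl
      (fun ans start =>
        let ans2 := min_coin_remove p start k
        let ans2 := if start ≥ 1 then ans2 + PySem.List.pyGetD cum (start - 1) 0 else ans2
        min ans ans2) 100000000

-- ===== PORT B =====
-- while lo < hi: mid=(lo+hi)//2; if piles[mid]>limit: hi=mid else lo=mid+1  (mid always in range)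
def pvBisect (piles : List Int) (limit : Int) (lo hi : Nat) : Nat :=
  if _h : lo < hi then
    if PySem.List.pyGetD piles (((lo + hi) / 2 : Nat) : Int) 0 > limit then
      pvBisect piles limit lo ((lo + hi) / 2)
    else pvBisect piles limit ((lo + hi) / 2 + 1) hi
  else lo
termination_by hi - lo
decreasing_by all_goals omega

def min_coin_remove_all_alt (piles : List Int) (k : Int) : Int :=
  if piles.length == 1 then 0
  else
    let p := PySem.List.sorted piles (fun x => x) false
    let n := p.length
    let pr := (p.foldl (fun (st : List Int × Int) x =>
        let run := st.2 + x
        (st.1 ++ [run], run)) ([0], 0)).1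
    let total := PySem.List.pyGetD pr (n : Int) 0
    (PySem.List.pyRange 0 ((n : Int) - 1) 1).foldl
      (fun best s =>
        let limit := PySem.List.pyGetD p s 0 + k
        let lo := pvBisect p limit s.toNat n
        min best (PySem.List.pyGetD pr s 0 + (total - PySem.List.pyGetD pr (lo : Int) 0)
                  - limit * ((n : Int) - (lo : Int)))) 100000000

-- ===== PRECONDITION & SPEC =====
def Spec_min_coin_remove_all (piles : List Int) (k : Int) (out : Int) : Prop := out = min_coin_remove_all_alt piles k
instance (piles : List Int) (k : Int) (out : Int) : Decidable (Spec_min_coin_remove_all piles k out) := by unfold Spec_min_coin_remove_all; infer_instance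

-- ===== CLAIM (what is proved, stated in full; the proofs are below) =====
def Claim_equal_min_coin_remove_all : Prop := ∀ (piles : List Int) (k : Int), Dom_min_coin_remove_all piles k → Spec_min_coin_remove_all piles k (min_coin_remove_all piles k)

-- ===== LEMMAS AND PROOFS =====

-- the prefix-sum fold, characterized
def pvF : List Int × Int → Int → List Int × Int :=
  fun st x => let run := st.2 + x; (st.1 ++ [run], run)

theorem pvF_foldl (p : List Int) (acc : List Int) (run : Int) :
    p.foldl pvF (acc, run)
      = (acc ++ (List.range p.length).map (fun j => run + (p.take (j+1)).sum), run + p.sum) := by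
  induction p generalizing acc run with
  | nil => simp
  | cons x t ih =>
    simp only [List.foldl_cons]
    rw [show pvF (acc, run) x = (acc ++ [run + x], run + x) from rfl, ih]
    simp [List.range_succ_eq_map, List.map_map, Function.comp, add_assoc]

theorem pvPr_getD (p : List Int) (j : Nat) (hj : j ≤ p.length) :
    PySem.List.pyGetD ((p.foldl pvF ([0], 0)).1) (j : Int) 0 = (p.take j).sum := by
  rw [pvF_foldl]
  rw [PySem.List.pyGetD_of_nonneg _ _ (by positivity)]
  simp only [Int.toNat_natCast]
  cases j with
  | zero => simp
  | succ m =>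
    have hm : m < p.length := by omega
    simp [List.getD_eq_getElem?_getD, hm]

-- binary search specification (needs only that p is ≤-monotone by index)
theorem pvBisect_spec (p : List Int) (limit : Int)
    (hmono : ∀ (i j : Nat) (hij : i ≤ j) (hj : j < p.length), p[i]'(Nat.lt_of_le_of_lt hij hj) ≤ p[j]) :
    ∀ (d lo hi : Nat), hi - lo ≤ d → hi ≤ p.length →
    lo ≤ pvBisect p limit lo hi ∧ pvBisect p limit lo hi ≤ max lo hi ∧
    (∀ i : Nat, lo ≤ i → i < pvBisect p limit lo hi → (hi2 : i < p.length) → p[i] ≤ limit) ∧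
    (∀ i : Nat, pvBisect p limit lo hi ≤ i → i < hi → (hi2 : i < p.length) → limit < p[i]) := by
  intro d
  induction d with
  | zero =>
    intro lo hi hd hhi
    rw [pvBisect, dif_neg (by omega)]
    exact ⟨le_refl _, le_max_left _ _, fun i h1 h2 _ => by omega, fun i h1 h2 _ => by omega⟩
  | succ d ih =>
    intro lo hi hd hhi
    rw [pvBisect]
    by_cases hlh : lo < hi
    · rw [dif_pos hlh]
      have hmlen : (lo + hi) / 2 < p.length := by omega
      have hg : PySem.List.pyGetD p (((lo + hi) / 2 : Nat) : Int) 0 = p[(lo + hi) / 2]'hmlen := by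
        rw [PySem.List.pyGetD_eq_getElem p 0 (Int.natCast_nonneg _) (by exact_mod_cast hmlen)]
        have hidx : (((lo : Int) + (hi : Int)) / 2).toNat = (lo + hi) / 2 := by omega
        simp [hidx]
      rw [hg]
      by_cases hc : limit < p[(lo + hi) / 2]'hmlen
      · rw [if_pos hc]
        obtain ⟨h1, h2, h3, h4⟩ := ih lo ((lo + hi) / 2) (by omega) (by omega)
        refine ⟨h1, by omega, h3, ?_⟩
        intro i hri hihi hilen
        by_cases him : i < (lo + hi) / 2
        · exact h4 i hri him hilen
        · have := hmono ((lo + hi) / 2) i (by omega) hilen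
          omega
      · rw [if_neg hc]
        obtain ⟨h1, h2, h3, h4⟩ := ih ((lo + hi) / 2 + 1) hi (by omega) hhi
        refine ⟨by omega, by omega, ?_, h4⟩
        intro i hloi hir hilen
        by_cases him : (lo + hi) / 2 + 1 ≤ i
        · exact h3 i him hir hilen
        · have := hmono i ((lo + hi) / 2) (by omega) hmlen
          omega
    · rw [dif_neg hlh]
      exact ⟨le_refl _, le_max_left _ _, fun i h1 h2 _ => by omega, fun i h1 h2 _ => by omega⟩

-- sums of the clamped map
theorem pvSum_zero (L : Int) (l : List Int) (h : ∀ x ∈ l, x ≤ L) :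
    (l.map (fun x => if x > L then x - L else 0)).sum = 0 := by
  induction l with
  | nil => simp
  | cons x t ih =>
    have hx := h x (by simp)
    simp only [List.map_cons, List.sum_cons]
    rw [if_neg (by omega), ih (fun y hy => h y (by simp [hy]))]
    simp

theorem pvSum_shift (L : Int) (l : List Int) (h : ∀ x ∈ l, L < x) :
    (l.map (fun x => if x > L then x - L else 0)).sum = l.sum - L * l.length := by
  induction l with
  | nil => simp
  | cons x t ih =>
    have hx := h x (by simp)
    simp only [List.map_cons, List.sum_cons, List.length_cons]
    rw [if_pos (by omega), ih (fun y hy => h y (by simp [hy]))]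
    push_cast
    ring

-- A's helper as a sum over the suffix
theorem pvMcr_eq_sum (p : List Int) (s k : Int) (h0 : 0 ≤ s) (_h1 : s ≤ (p.length : Int)) :
    min_coin_remove p s k
      = ((p.drop s.toNat).map
          (fun x => if x > PySem.List.pyGetD p s 0 + k then x - (PySem.List.pyGetD p s 0 + k) else 0)).sum := by
  simp only [min_coin_remove]
  rw [PySem.List.pyRange_neg_one_eq_reverse]
  rw [show s - 1 + 1 = s from by ring, show (p.length : Int) - 1 + 1 = (p.length : Int) from by ring]
  rw [PySem.List.foldl_congr_mem _ _
      (fun ans i => ans + (if PySem.List.pyGetD p i 0 > PySem.List.pyGetD p s 0 + k then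
        PySem.List.pyGetD p i 0 - (PySem.List.pyGetD p s 0 + k) else 0)) 0
      (by intro acc x _; by_cases h : PySem.List.pyGetD p x 0 > PySem.List.pyGetD p s 0 + k <;> simp [h])]
  rw [PySem.List.foldl_add]
  rw [List.map_reverse, List.sum_reverse]
  rw [show (fun i => if PySem.List.pyGetD p i 0 > PySem.List.pyGetD p s 0 + k then
        PySem.List.pyGetD p i 0 - (PySem.List.pyGetD p s 0 + k) else 0)
      = (fun x => if x > PySem.List.pyGetD p s 0 + k then x - (PySem.List.pyGetD p s 0 + k) else 0)
        ∘ (fun j => PySem.List.pyGetD p j 0) from rfl]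
  rw [← List.map_map, PySem.List.map_pyGetD_pyRange' p 0 h0]
  simp

-- prefix-sum values of the two folds
theorem pvCum_getD (P : List Int) (j : Nat) (hj : j < P.length) :
    PySem.List.pyGetD ((P.foldl pvF ([], 0)).1) (j : Int) 0 = (P.take (j+1)).sum := by
  rw [pvF_foldl]
  rw [PySem.List.pyGetD_of_nonneg _ _ (by positivity)]
  simp only [Int.toNat_natCast, List.nil_append]
  simp [List.getD_eq_getElem?_getD, hj]

-- the value A's loop folds in at index s equals the value B's loop folds in
theorem pvElem_eq (P : List Int) (k s : Int)
    (hmono : ∀ (i j : Nat) (hij : i ≤ j) (hj : j < P.length), P[i]'(Nat.lt_of_le_of_lt hij hj) ≤ P[j])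
    (hs0 : 0 ≤ s) (hs1 : s < (P.length : Int)) :
    (if s ≥ 1 then
        min_coin_remove P s k + PySem.List.pyGetD ((P.foldl pvF ([], 0)).1) (s - 1) 0
      else min_coin_remove P s k)
    = PySem.List.pyGetD ((P.foldl pvF ([0], 0)).1) s 0
      + (PySem.List.pyGetD ((P.foldl pvF ([0], 0)).1) (P.length : Int) 0
         - PySem.List.pyGetD ((P.foldl pvF ([0], 0)).1)
             ((pvBisect P (PySem.List.pyGetD P s 0 + k) s.toNat P.length : Nat) : Int) 0)
      - (PySem.List.pyGetD P s 0 + k)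
        * ((P.length : Int) - ((pvBisect P (PySem.List.pyGetD P s 0 + k) s.toNat P.length : Nat) : Int)) := by
  set L := PySem.List.pyGetD P s 0 + k with hL
  set r := pvBisect P L s.toNat P.length with hr
  have hsn : s.toNat ≤ P.length := by omega
  obtain ⟨hr1, hr2, hr3, hr4⟩ :=
    pvBisect_spec P L hmono P.length s.toNat P.length (by omega) (le_refl _)
  have hrn : r ≤ P.length := by omega
  -- LHS = min_coin_remove + (P.take s.toNat).sum
  have hlhs : (if s ≥ 1 then
        min_coin_remove P s k + PySem.List.pyGetD ((P.foldl pvF ([], 0)).1) (s - 1) 0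
      else min_coin_remove P s k)
      = min_coin_remove P s k + (P.take s.toNat).sum := by
    by_cases hs : s ≥ 1
    · rw [if_pos hs]
      have he : s - 1 = ((s.toNat - 1 : Nat) : Int) := by omega
      rw [he, pvCum_getD P (s.toNat - 1) (by omega),
        show s.toNat - 1 + 1 = s.toNat from by omega]
    · rw [if_neg hs]
      have : s = 0 := by omega
      simp [this]
  rw [hlhs]
  -- RHS prefix values
  have hsrw : s = ((s.toNat : Nat) : Int) := by omega
  rw [show PySem.List.pyGetD ((P.foldl pvF ([0], 0)).1) s 0
        = (P.take s.toNat).sum from by rw [hsrw]; exact pvPr_getD P s.toNat hsn]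
  rw [pvPr_getD P P.length (le_refl _), pvPr_getD P r hrn, List.take_length]
  -- the suffix sum
  rw [pvMcr_eq_sum P s k hs0 (le_of_lt hs1), ← hL]
  have hsplit : P.drop s.toNat = (P.drop s.toNat).take (r - s.toNat) ++ P.drop r := by
    conv_lhs => rw [← List.take_append_drop (r - s.toNat) (P.drop s.toNat)]
    rw [List.drop_drop, show s.toNat + (r - s.toNat) = r from by omega]
  rw [hsplit, List.map_append, List.sum_append]
  rw [pvSum_zero L _ ?hz, pvSum_shift L _ ?hs]
  case hz =>
    intro x hx
    obtain ⟨j, hj, rfl⟩ := List.mem_iff_getElem.1 hx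
    simp only [List.getElem_take, List.getElem_drop]
    have hjlen : s.toNat + j < P.length := by
      simp [List.length_take, List.length_drop] at hj
      omega
    exact hr3 (s.toNat + j) (by omega) (by simp [List.length_take, List.length_drop] at hj; omega) hjlen
  case hs =>
    intro x hx
    obtain ⟨j, hj, rfl⟩ := List.mem_iff_getElem.1 hx
    simp only [List.getElem_drop]
    have hjlen : r + j < P.length := by
      simp [List.length_drop] at hj
      omega
    exact hr4 (r + j) (by omega) (by omega) hjlen
  -- arithmetic
  have hdropsum : (P.drop r).sum = P.sum - (P.take r).sum := by
    have := List.take_append_drop r P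
    have h2 : (P.take r ++ P.drop r).sum = P.sum := by rw [this]
    rw [List.sum_append] at h2
    omega
  rw [hdropsum, List.length_drop]
  have hcast : ((P.length - r : Nat) : Int) = (P.length : Int) - (r : Int) := by omega
  rw [hcast]
  ring

theorem min_coin_remove_all_eq (piles : List Int) (k : Int) :
    min_coin_remove_all piles k = min_coin_remove_all_alt piles k := by
  by_cases hlen1 : piles.length = 1
  · simp [min_coin_remove_all, min_coin_remove_all_alt, hlen1]
  · have hb : (piles.length == 1) = false := by simp [hlen1]
    simp only [min_coin_remove_all, min_coin_remove_all_alt, hb, Bool.false_eq_true, if_false]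
    rw [show (fun (st : List Int × Int) i =>
        (st.1 ++ [st.2 + PySem.List.pyGetD (PySem.List.sorted piles (fun x => x) false) i 0],
         st.2 + PySem.List.pyGetD (PySem.List.sorted piles (fun x => x) false) i 0))
      = (fun acc j => pvF acc (PySem.List.pyGetD (PySem.List.sorted piles (fun x => x) false) j 0))
      from rfl]
    rw [PySem.List.foldl_pyRange_zero_pyGetD' (PySem.List.sorted piles (fun x => x) false) 0 pvF ([], 0)]
    rw [show (fun (st : List Int × Int) x => (st.1 ++ [st.2 + x], st.2 + x)) = pvF from rfl]
    apply PySem.List.foldl_congr_mem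
    intro acc x hx
    rw [PySem.List.mem_pyRange_one] at hx
    exact congrArg (min acc)
      (pvElem_eq (PySem.List.sorted piles (fun x => x) false) k x
        (fun i j hij hj => PySem.List.sorted_id_getElem_mono piles hij hj)
        hx.1 (by omega))

-- ===== VERDICT (by name: the statement is the Claim_ definition above) =====
theorem min_coin_remove_all_spec : Claim_equal_min_coin_remove_all := by
  intro piles k _
  unfold Spec_min_coin_remove_all
  exact min_coin_remove_all_eq piles k
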